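-- pv_equiv track=rewrite | github.com/ODCS1/PersonalTechStudies | python/exercicios/lista8/ex11.py | posicao_mais_a_esquerda_while
-- ===== SOURCE A (Python) =====
-- def posicao_mais_a_esquerda_while(tupla_numeros: tuple[int], numeros_procurados: tuple[int]) -> int:
--     if not (isinstance(tupla_numeros, tuple) and (isinstance(numeros_procurados, tuple))):
--         raise ValueError
--     posicao = -1
--     c = 0
--     while c < len(tupla_numeros):
--         if tupla_numeros[c] in numeros_procurados:
--             posicao = c
--             break
--         c += 1
--     return posicao
-- ===== SOURCE B (Python) =====
-- def posicao_mais_a_esquerda_while(tupla_numeros: tuple, numeros_procurados: tuple) -> int: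
--     if not (isinstance(tupla_numeros, tuple) and (isinstance(numeros_procurados, tuple))):
--         raise ValueError
--     primeira = {}
--     for i, v in enumerate(tupla_numeros):
--         if v not in primeira:
--             primeira[v] = i
--     achados = [primeira[n] for n in numeros_procurados if n in primeira]
--     return min(achados) if achados else -1
-- ===== Notes on version B (the rewrite author's own statement) =====
-- stated objective: alternative
-- what changed: Replaces A's index-scanning while loop with repeated 'in' membership tests by a single pass building a first-index dict over the tuple, then iterating over the searched values and taking the minimum of their first indices (-1 if none occur).
import Mathlib
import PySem

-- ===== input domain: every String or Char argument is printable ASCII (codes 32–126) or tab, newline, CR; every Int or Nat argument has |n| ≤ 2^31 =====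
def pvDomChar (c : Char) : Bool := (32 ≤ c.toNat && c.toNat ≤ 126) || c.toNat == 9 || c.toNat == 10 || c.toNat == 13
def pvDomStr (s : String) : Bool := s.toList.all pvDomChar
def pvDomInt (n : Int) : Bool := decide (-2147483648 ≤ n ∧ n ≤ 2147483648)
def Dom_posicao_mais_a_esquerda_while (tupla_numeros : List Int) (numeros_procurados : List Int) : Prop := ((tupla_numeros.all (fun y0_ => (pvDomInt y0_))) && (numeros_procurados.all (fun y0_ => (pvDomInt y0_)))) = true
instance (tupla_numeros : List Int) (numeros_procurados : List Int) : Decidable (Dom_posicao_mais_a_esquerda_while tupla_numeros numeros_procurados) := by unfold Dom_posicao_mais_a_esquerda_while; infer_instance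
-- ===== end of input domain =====

-- B replaces A's left-to-right scan with repeated membership tests by a first-index table built
-- once over the tuple, then a minimum over the table entries of the searched values (alternative
-- decomposition; same return value). The Python-level isinstance/ValueError guard is a type check
-- that cannot fire for List Int arguments, so it does not appear in the ports.

-- ===== PORT A =====
-- 'posicao = -1; c = 0; while c < len: if tupla[c] in procurados: return c; c += 1; return -1'
def posA_loop (tupla_numeros numeros_procurados : List Int) (c : Nat) : Int :=
  if h : c < tupla_numeros.length then
    if numeros_procurados.contains tupla_numeros[c] then (c : Int)
    else posA_loop tupla_numeros numeros_procurados (c + 1)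
  else -1
termination_by tupla_numeros.length - c

def posicao_mais_a_esquerda_while (tupla_numeros : List Int) (numeros_procurados : List Int) : Int :=
  posA_loop tupla_numeros numeros_procurados 0

-- ===== PORT B =====
def posicao_mais_a_esquerda_while_alt (tupla_numeros : List Int) (numeros_procurados : List Int) : Int :=
  -- primeira = {}; for i, v in enumerate(tupla_numeros): if v not in primeira: primeira[v] = i
  let primeira : PySem.Dict Int Int :=
    (PySem.List.enumerate tupla_numeros 0).foldl
      (fun d iv => if d.contains iv.2 then d else d.insert iv.2 iv.1) PySem.Dict.empty
  -- achados = [primeira[n] for n in numeros_procurados if n in primeira]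
  let achados : List Int := numeros_procurados.filterMap (fun n => primeira.get? n)
  -- return min(achados) if achados else -1
  match PySem.List.min? achados (fun x => x) with
  | some m => m
  | none => -1

-- ===== PRECONDITION & SPEC =====
def Spec_posicao_mais_a_esquerda_while (tupla_numeros : List Int) (numeros_procurados : List Int) (out : Int) : Prop := out = posicao_mais_a_esquerda_while_alt tupla_numeros numeros_procurados
instance (tupla_numeros : List Int) (numeros_procurados : List Int) (out : Int) : Decidable (Spec_posicao_mais_a_esquerda_while tupla_numeros numeros_procurados out) := by unfold Spec_posicao_mais_a_esquerda_while; infer_instance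

-- ===== CLAIM (what is proved, stated in full; the proofs are below) =====
def Claim_equal_posicao_mais_a_esquerda_while : Prop := ∀ (tupla_numeros : List Int) (numeros_procurados : List Int), Dom_posicao_mais_a_esquerda_while tupla_numeros numeros_procurados → Spec_posicao_mais_a_esquerda_while tupla_numeros numeros_procurados (posicao_mais_a_esquerda_while tupla_numeros numeros_procurados)

-- ===== LEMMAS AND PROOFS =====

-- The first-index table: looking up v in the dict built by B's loop gives v's first index in tupla (offset by s).
lemma get?_buildFirst (tupla : List Int) (s : Int) (d : PySem.Dict Int Int) (v : Int) :
    ((PySem.List.enumerate tupla s).foldl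
      (fun d iv => if d.contains iv.2 then d else d.insert iv.2 iv.1) d).get? v
    = match d.get? v with
      | some x => some x
      | none => (tupla.findIdx? (· == v)).map (fun j => s + (j : Int)) := by
  induction tupla generalizing s d with
  | nil =>
    simp [PySem.List.enumerate_nil]
    cases d.get? v <;> simp
  | cons x xs ih =>
    rw [PySem.List.enumerate_cons, List.foldl_cons, ih]
    by_cases hc : d.contains x = true
    · rw [if_pos hc]
      by_cases hv : v = x
      · subst hv
        have hcs : (d.get? v).isSome := by
          rw [← PySem.Dict.contains_eq_isSome_get?]; exact hc
        obtain ⟨w, hw⟩ := Option.isSome_iff_exists.mp hcs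
        simp [hw]
      · have hx : (x == v) = false := by simp [Ne.symm hv]
        rw [List.findIdx?_cons, hx]
        simp only [Bool.false_eq_true, if_false]
        cases hdv : d.get? v with
        | none =>
          cases hfx : xs.findIdx? (· == v)
          · simp
          · simp
            omega
        | some w => simp
    · rw [if_neg hc]
      by_cases hv : v = x
      · subst hv
        rw [PySem.Dict.get?_insert_self]
        have hdn : d.get? v = none := by
          rw [PySem.Dict.contains_eq_isSome_get?] at hc
          exact Option.not_isSome_iff_eq_none.mp hc
        rw [List.findIdx?_cons]
        simp [hdn]
      · rw [PySem.Dict.get?_insert_of_ne d s hv]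
        have hx : (x == v) = false := by simp [Ne.symm hv]
        rw [List.findIdx?_cons, hx]
        simp only [Bool.false_eq_true, if_false]
        cases hdv : d.get? v with
        | none =>
          cases hfx : xs.findIdx? (· == v)
          · simp
          · simp
            omega
        | some w => simp

-- A's while loop from position c is the leftmost match in the suffix.
lemma posA_loop_eq (tupla nums : List Int) :
    ∀ k c, tupla.length - c ≤ k →
      posA_loop tupla nums c
      = match (tupla.drop c).findIdx? (fun x => nums.contains x) with
        | some j => ((c + j : Nat) : Int)
        | none => -1 := by
  intro k
  induction k with
  | zero =>
    intro c hc
    have hlen : tupla.length ≤ c := by omega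
    rw [posA_loop]
    simp [List.drop_eq_nil_of_le hlen, Nat.not_lt.mpr hlen]
  | succ k ih =>
    intro c hc
    rw [posA_loop]
    by_cases h : c < tupla.length
    · have hdrop : tupla.drop c = tupla[c] :: tupla.drop (c + 1) :=
        (List.getElem_cons_drop h).symm
      rw [dif_pos h, hdrop, List.findIdx?_cons]
      by_cases hmem : nums.contains tupla[c] = true
      · rw [if_pos hmem, if_pos hmem]
        simp
      · rw [if_neg hmem, if_neg hmem, ih (c + 1) (by omega)]
        cases hfx : (tupla.drop (c + 1)).findIdx? (fun x => nums.contains x) with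
        | none => simp
        | some j =>
          simp only [Option.map_some]
          push_cast
          ring_nf
    · have hlen : tupla.length ≤ c := by omega
      rw [dif_neg h]
      simp [List.drop_eq_nil_of_le hlen]

-- ===== VERDICT (by name: the statement is the Claim_ definition above) =====
theorem posicao_mais_a_esquerda_while_spec : Claim_equal_posicao_mais_a_esquerda_while := by
  intro tupla nums _
  unfold Spec_posicao_mais_a_esquerda_while posicao_mais_a_esquerda_while
    posicao_mais_a_esquerda_while_alt
  rw [posA_loop_eq tupla nums tupla.length 0 (by omega)]
  simp only [List.drop_zero]
  have hachados : nums.filterMap (fun n =>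
      ((PySem.List.enumerate tupla 0).foldl
        (fun d iv => if d.contains iv.2 then d else d.insert iv.2 iv.1)
        PySem.Dict.empty).get? n)
      = nums.filterMap (fun n => (tupla.findIdx? (· == n)).map (fun j => (j : Int))) := by
    apply List.filterMap_congr
    intro n _
    rw [get?_buildFirst]
    simp [PySem.Dict.get?_empty]
  rw [hachados]
  set L := nums.filterMap (fun n => (tupla.findIdx? (· == n)).map (fun j => (j : Int))) with hL
  cases hfi : tupla.findIdx? (fun x => nums.contains x) with
  | none =>
    have hnone : ∀ x ∈ nums, tupla.findIdx? (· == x) = none := by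
      intro x hx
      rw [List.findIdx?_eq_none_iff]
      intro y hy
      have hy' := (List.findIdx?_eq_none_iff.mp hfi) y hy
      by_contra h
      have hyx : y = x := by simpa using h
      subst hyx
      simp at hy'
      exact hy' hx
    have hLnil : L = [] := by
      rw [hL, List.filterMap_eq_nil_iff]
      intro n hn
      simp [hnone n hn]
    rw [hLnil]
    have hm : PySem.List.min? ([] : List Int) (fun x => x) = none :=
      (PySem.List.min?_eq_none_iff _ _).mpr rfl
    rw [hm]
  | some j =>
    obtain ⟨hj, hpj, hmin⟩ := List.findIdx?_eq_some_iff_getElem.mp hfi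
    have hn0 : tupla[j] ∈ nums := by simpa using hpj
    have hfirst : tupla.findIdx? (· == tupla[j]) = some j := by
      rw [List.findIdx?_eq_some_iff_getElem]
      refine ⟨hj, by simp, fun i hij hcontra => ?_⟩
      have hti : tupla[i] = tupla[j] := by simpa using hcontra
      exact hmin i hij (by rw [hti]; exact hpj)
    have hjL : (j : Int) ∈ L := List.mem_filterMap.mpr ⟨tupla[j], hn0, by simp [hfirst]⟩
    have hlb : ∀ x ∈ L, (j : Int) ≤ x := by
      intro x hx
      obtain ⟨n, hn, hsome⟩ := List.mem_filterMap.mp hx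
      cases hfi2 : tupla.findIdx? (· == n) with
      | none => simp [hfi2] at hsome
      | some i =>
        rw [hfi2] at hsome
        simp at hsome
        subst hsome
        obtain ⟨hi, hpi, _⟩ := List.findIdx?_eq_some_iff_getElem.mp hfi2
        have hti : tupla[i] = n := by simpa using hpi
        have hci : nums.contains tupla[i] = true := by rw [hti]; simpa using hn
        have hji : ¬ i < j := fun hij => hmin i hij hci
        exact_mod_cast Nat.le_of_not_lt hji
    cases hm : PySem.List.min? L (fun x => x) with
    | none =>
      have : L = [] := (PySem.List.min?_eq_none_iff _ _).mp hm
      rw [this] at hjL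
      simp at hjL
    | some m =>
      have h1 : m ∈ L := PySem.List.min?_mem hm
      have h2 : m ≤ (j : Int) := PySem.List.min?_isMin hm _ hjL
      have h3 : (j : Int) ≤ m := hlb m h1
      simp
      omega
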